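-- pv_equiv track=rewrite | github.com/dvirbenor/audio-classification-playground | audio_classification_playground/panns/build_category_mapping.py | map_to_high_level
-- ===== SOURCE A (Python) =====
-- def get_ancestors(class_id: str, child_to_parents: dict[str, list[str]]) -> set[str]:
--     """Get all ancestors of a class by traversing the ontology hierarchy."""
--     ancestors = set()
--     queue = [class_id]
--     while queue:
--         current = queue.pop(0)
--         if current in child_to_parents:
--             for parent in child_to_parents[current]:
--                 if parent not in ancestors:
--                     ancestors.add(parent)
--                     queue.append(parent)
--     return ancestors
--
-- def map_to_high_level(class_id: str, child_to_parents: dict[str, list[str]], id_to_name: dict[str, str]) -> str: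
--     """
--     Map a class to its high-level category (Music, Speech, or SFX).
--
--     Logic:
--     - If class or ancestors contain "Music" → Music
--     - Else if class or ancestors contain "Speech" or "Human voice" → Speech
--     - Else → SFX (default for sound effects)
--     """
--     ancestors = get_ancestors(class_id, child_to_parents)
--
--     # Include the class itself in the check
--     all_ids = ancestors | {class_id}
--     ancestor_names = {id_to_name.get(aid, "") for aid in all_ids}
--
--     if 'Music' in ancestor_names:
--         return 'Music'
--     elif 'Speech' in ancestor_names or 'Human voice' in ancestor_names:
--         return 'Speech'
--     else:
--         return 'SFX'
-- ===== SOURCE B (Python) =====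
-- def map_to_high_level(class_id: str, child_to_parents: dict[str, list[str]], id_to_name: dict[str, str]) -> str:
--     """Recursive DFS over the ontology instead of a BFS queue; then classify by
--     scanning the ids directly instead of materialising a name set."""
--     ancestors = set()
--
--     def visit(node):
--         for parent in child_to_parents.get(node, []):
--             if parent not in ancestors:
--                 ancestors.add(parent)
--                 visit(parent)
--
--     visit(class_id)
--     ids = ancestors | {class_id}
--     if any(id_to_name.get(i, "") == 'Music' for i in ids):
--         return 'Music'
--     if any(id_to_name.get(i, "") in ('Speech', 'Human voice') for i in ids):
--         return 'Speech'
--     return 'SFX'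
-- ===== Notes on version B (the rewrite author's own statement) =====
-- stated objective: alternative
-- what changed: The queue-driven BFS over the ontology is replaced by a recursive DFS (inner visit() mutating a shared visited set), and the final classification scans the id set directly with any() instead of materialising a set of names.
import Mathlib
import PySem

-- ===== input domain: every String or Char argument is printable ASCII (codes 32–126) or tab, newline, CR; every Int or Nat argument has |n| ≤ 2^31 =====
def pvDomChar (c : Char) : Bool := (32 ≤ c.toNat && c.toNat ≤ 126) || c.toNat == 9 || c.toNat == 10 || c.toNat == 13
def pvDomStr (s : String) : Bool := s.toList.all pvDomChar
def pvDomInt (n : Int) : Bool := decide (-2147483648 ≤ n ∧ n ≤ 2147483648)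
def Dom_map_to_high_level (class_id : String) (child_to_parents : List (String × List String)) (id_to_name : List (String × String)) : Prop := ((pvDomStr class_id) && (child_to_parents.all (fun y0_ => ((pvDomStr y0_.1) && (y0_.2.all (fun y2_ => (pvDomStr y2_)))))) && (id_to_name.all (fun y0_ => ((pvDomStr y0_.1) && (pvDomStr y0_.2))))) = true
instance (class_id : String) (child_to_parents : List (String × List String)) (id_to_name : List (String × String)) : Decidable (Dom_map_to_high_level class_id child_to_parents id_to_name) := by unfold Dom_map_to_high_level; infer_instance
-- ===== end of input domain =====

-- B replaces A's queue-driven BFS over the ontology with a recursive DFS and classifies by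
-- scanning the id set with any() instead of building a set of names (objective: alternative).

-- ===== PORT A =====
-- fuel for the BFS while-loop (a totality device only; proved sufficient below):
-- the loop pops once per fuel unit and, as proved in pv_bfs_main, it pops at most
-- 1 + (number of parent entries) times.
def pvFuel (g : List (String × List String)) : Nat := (g.flatMap (·.2)).length + 1

-- the body of A's inner `for parent in child_to_parents[current]` loop
def pvBfsStep (st : PySem.Set String × List String) (p : String) : PySem.Set String × List String :=
  if PySem.Set.contains st.1 p then st else (PySem.Set.add st.1 p, st.2 ++ [p])

-- A's `while queue:` loop (queue.pop(0) = take the head; appends go to the tail)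
def pvBfsLoop (g : List (String × List String)) : Nat → PySem.Set String → List String → PySem.Set String
  | _, anc, [] => anc
  | 0, anc, _ :: _ => anc
  | fuel+1, anc, current :: rest =>
    if PySem.Dict.contains ⟨g⟩ current then
      let st := (PySem.Dict.getD ⟨g⟩ current []).foldl pvBfsStep (anc, rest)
      pvBfsLoop g fuel st.1 st.2
    else
      pvBfsLoop g fuel anc rest

def pvGetAncestors (class_id : String) (g : List (String × List String)) : PySem.Set String :=
  pvBfsLoop g (pvFuel g) PySem.Set.empty [class_id]

def map_to_high_level (class_id : String) (child_to_parents : List (String × List String)) (id_to_name : List (String × String)) : String :=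
  let ancestors := pvGetAncestors class_id child_to_parents
  let all_ids := PySem.Set.union ancestors [class_id]
  let ancestor_names : PySem.Set String :=
    PySem.Set.ofList (all_ids.map (fun aid => PySem.Dict.getD ⟨id_to_name⟩ aid ""))
  if PySem.Set.contains ancestor_names "Music" then "Music"
  else if PySem.Set.contains ancestor_names "Speech" || PySem.Set.contains ancestor_names "Human voice" then "Speech"
  else "SFX"

-- ===== PORT B =====
-- fuel for B's recursion (a totality device only; the recursion depth is bounded by the
-- number of distinct parents, as proved in pv_dfs_main)
def pvFuelB (g : List (String × List String)) : Nat := (g.flatMap (·.2)).length + 1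

-- B's recursive `visit`
def pvDfsVisit (g : List (String × List String)) : Nat → String → PySem.Set String → PySem.Set String
  | 0, _, anc => anc
  | fuel+1, node, anc =>
    (PySem.Dict.getD ⟨g⟩ node []).foldl
      (fun s p => if PySem.Set.contains s p then s else pvDfsVisit g fuel p (PySem.Set.add s p)) anc

def map_to_high_level_alt (class_id : String) (child_to_parents : List (String × List String)) (id_to_name : List (String × String)) : String :=
  let ancestors := pvDfsVisit child_to_parents (pvFuelB child_to_parents) class_id PySem.Set.empty
  let ids := PySem.Set.union ancestors [class_id]
  if ids.any (fun i => PySem.Dict.getD ⟨id_to_name⟩ i "" == "Music") then "Music"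
  else if ids.any (fun i => PySem.Dict.getD ⟨id_to_name⟩ i "" == "Speech" || PySem.Dict.getD ⟨id_to_name⟩ i "" == "Human voice") then "Speech"
  else "SFX"

-- ===== PRECONDITION & SPEC =====
def Spec_map_to_high_level (class_id : String) (child_to_parents : List (String × List String)) (id_to_name : List (String × String)) (out : String) : Prop := out = map_to_high_level_alt class_id child_to_parents id_to_name
instance (class_id : String) (child_to_parents : List (String × List String)) (id_to_name : List (String × String)) (out : String) : Decidable (Spec_map_to_high_level class_id child_to_parents id_to_name out) := by unfold Spec_map_to_high_level; infer_instance

-- ===== CLAIM (what is proved, stated in full; the proofs are below) =====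
def Claim_equal_map_to_high_level : Prop := ∀ (class_id : String) (child_to_parents : List (String × List String)) (id_to_name : List (String × String)), Dom_map_to_high_level class_id child_to_parents id_to_name → Spec_map_to_high_level class_id child_to_parents id_to_name (map_to_high_level class_id child_to_parents id_to_name)

-- ===== LEMMAS AND PROOFS =====

-- the parents of a node (child_to_parents.get(x, [])) and the pool of all parent entries
def pvPar (g : List (String × List String)) (x : String) : List String := PySem.Dict.getD ⟨g⟩ x []
def pvP (g : List (String × List String)) : List String := g.flatMap (·.2)

-- x is a (strict) ancestor of root in the ontology
inductive pvReach (g : List (String × List String)) (root : String) : String → Prop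
  | base {p : String} : p ∈ pvPar g root → pvReach g root p
  | step {x p : String} : pvReach g root x → p ∈ pvPar g x → pvReach g root p

theorem pv_par_sub (g : List (String × List String)) (x p : String) (h : p ∈ pvPar g x) : p ∈ pvP g := by
  unfold pvPar PySem.Dict.getD PySem.Dict.get? at h
  rcases hf : List.find? (fun q => q.1 == x) (PySem.Dict.mk g).items with _ | pr
  · rw [hf] at h; simp at h
  · rw [hf] at h
    simp only [Option.map_some, Option.getD_some] at h
    exact List.mem_flatMap.2 ⟨pr, List.mem_of_find?_eq_some hf, h⟩

theorem pv_par_of_not_contains (g : List (String × List String)) (x : String)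
    (h : PySem.Dict.contains ⟨g⟩ x = false) : pvPar g x = [] := by
  unfold pvPar PySem.Dict.getD PySem.Dict.get?
  rcases hf : List.find? (fun q => q.1 == x) (PySem.Dict.mk g).items with _ | pr
  · rw [hf]; rfl
  · exfalso
    have hpr := List.find?_some hf
    have hmem := List.mem_of_find?_eq_some hf
    unfold PySem.Dict.contains at h
    have := List.any_eq_false.1 h pr hmem
    simp_all

theorem pv_len_le {α : Type} {l₁ l₂ : List α} [DecidableEq α] (h1 : l₁.Nodup) (h2 : ∀ x ∈ l₁, x ∈ l₂) :
    l₁.length ≤ l₂.length := by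
  calc l₁.length = l₁.toFinset.card := (List.toFinset_card_of_nodup h1).symm
    _ ≤ l₂.toFinset.card := Finset.card_le_card (fun x hx => List.mem_toFinset.2 (h2 x (List.mem_toFinset.1 hx)))
    _ ≤ l₂.length := l₂.toFinset_card_le

theorem pv_reach_mem (g : List (String × List String)) (root : String) (S : List String)
    (hroot : ∀ p ∈ pvPar g root, p ∈ S) (hclosed : ∀ a ∈ S, ∀ p ∈ pvPar g a, p ∈ S) :
    ∀ x, pvReach g root x → x ∈ S := by
  intro x hx
  induction hx with
  | base h => exact hroot _ h
  | step _ h ih => exact hclosed _ ih _ h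

-- the inner `for parent in …` fold of A's BFS
theorem pv_bfs_fold (ps : List String) : ∀ (s : PySem.Set String) (q : List String), s.Nodup →
    (∀ x ∈ s, x ∈ (ps.foldl pvBfsStep (s, q)).1) ∧
    (ps.foldl pvBfsStep (s, q)).1.Nodup ∧
    (∀ a ∈ (ps.foldl pvBfsStep (s, q)).1, a ∈ s ∨ a ∈ ps) ∧
    (∀ p ∈ ps, p ∈ (ps.foldl pvBfsStep (s, q)).1) ∧
    (∀ a ∈ (ps.foldl pvBfsStep (s, q)).1, a ∈ s ∨ a ∈ (ps.foldl pvBfsStep (s, q)).2) ∧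
    (∀ x ∈ q, x ∈ (ps.foldl pvBfsStep (s, q)).2) ∧
    (∀ x ∈ (ps.foldl pvBfsStep (s, q)).2, x ∈ q ∨ x ∈ (ps.foldl pvBfsStep (s, q)).1) ∧
    ((ps.foldl pvBfsStep (s, q)).1.length + q.length = s.length + (ps.foldl pvBfsStep (s, q)).2.length) := by
  induction ps with
  | nil =>
    intro s q hN
    simp only [List.foldl_nil]
    refine ⟨fun x hx => hx, hN, fun a ha => Or.inl ha, ?_, fun a ha => Or.inl ha,
      fun x hx => hx, fun x hx => Or.inl hx, trivial⟩
    intro p hp; exact absurd hp (List.not_mem_nil)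
  | cons p ps ih =>
    intro s q hN
    by_cases hc : PySem.Set.contains s p = true
    · have hps : p ∈ s := (PySem.Set.contains_iff s p).1 hc
      have hstep : pvBfsStep (s, q) p = (s, q) := by
        simp only [pvBfsStep]; rw [if_pos hc]
      simp only [List.foldl_cons, hstep]
      obtain ⟨c1, c2, c3, c4, c5, c6, c7, c8⟩ := ih s q hN
      refine ⟨c1, c2, fun a ha => (c3 a ha).imp id (List.mem_cons_of_mem p), ?_, c5, c6, c7, c8⟩
      intro x hx
      rcases List.mem_cons.1 hx with rfl | hx
      · exact c1 _ hps
      · exact c4 _ hx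
    · have hps : p ∉ s := fun hmem => hc ((PySem.Set.contains_iff s p).2 hmem)
      have hadd : PySem.Set.add s p = s ++ [p] := by
        unfold PySem.Set.add; rw [if_neg hc]
      have hstep : pvBfsStep (s, q) p = (PySem.Set.add s p, q ++ [p]) := by
        simp only [pvBfsStep]; rw [if_neg hc]
      simp only [List.foldl_cons, hstep]
      have hN' : (PySem.Set.add s p).Nodup := PySem.Set.nodup_add s p hN
      obtain ⟨c1, c2, c3, c4, c5, c6, c7, c8⟩ := ih (PySem.Set.add s p) (q ++ [p]) hN'
      have hmemadd : ∀ x, x ∈ PySem.Set.add s p ↔ x ∈ s ∨ x = p := fun x => PySem.Set.mem_add s p x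
      refine ⟨fun x hx => c1 x ((hmemadd x).2 (Or.inl hx)), c2, ?_, ?_, ?_, ?_, ?_, ?_⟩
      · intro a ha
        rcases c3 a ha with h | h
        · rcases (hmemadd a).1 h with h' | rfl
          · exact Or.inl h'
          · exact Or.inr List.mem_cons_self
        · exact Or.inr (List.mem_cons_of_mem p h)
      · intro x hx
        rcases List.mem_cons.1 hx with rfl | hx
        · exact c1 _ ((hmemadd x).2 (Or.inr rfl))
        · exact c4 _ hx
      · intro a ha
        rcases c5 a ha with h | h
        · rcases (hmemadd a).1 h with h' | rfl
          · exact Or.inl h'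
          · exact Or.inr (c6 _ (by simp))
        · exact Or.inr h
      · intro x hx
        exact c6 _ (List.mem_append_left _ hx)
      · intro x hx
        rcases c7 x hx with h | h
        · rcases List.mem_append.1 h with h' | h'
          · exact Or.inl h'
          · exact Or.inr (c1 _ ((hmemadd x).2 (Or.inr (List.mem_singleton.1 h'))))
        · exact Or.inr h
      · have hlen : (PySem.Set.add s p).length = s.length + 1 := by rw [hadd]; simp
        have hq : (q ++ [p]).length = q.length + 1 := by simp
        omega

-- the BFS worklist loop computes exactly the set of ancestors
theorem pv_bfs_main (g : List (String × List String)) (root : String) :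
    ∀ (fuel : Nat) (anc : PySem.Set String) (queue : List String),
    anc.Nodup → (∀ a ∈ anc, a ∈ pvP g) →
    queue.length + ((pvP g).length - anc.length) ≤ fuel →
    (∀ x ∈ queue, x = root ∨ pvReach g root x) →
    (∀ a ∈ anc, pvReach g root a) →
    (∀ a ∈ anc, a ∈ queue ∨ ∀ p ∈ pvPar g a, p ∈ anc) →
    (root ∈ queue ∨ ∀ p ∈ pvPar g root, p ∈ anc) →
    (∀ a ∈ anc, a ∈ pvBfsLoop g fuel anc queue) ∧
    (∀ a ∈ pvBfsLoop g fuel anc queue, pvReach g root a) ∧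
    (∀ p ∈ pvPar g root, p ∈ pvBfsLoop g fuel anc queue) ∧
    (∀ a ∈ pvBfsLoop g fuel anc queue, ∀ p ∈ pvPar g a, p ∈ pvBfsLoop g fuel anc queue) := by
  intro fuel
  induction fuel with
  | zero =>
    intro anc queue hN hsub hfuel hQ hA hcl hroot
    cases queue with
    | nil =>
      refine ⟨fun a ha => ha, hA, ?_, ?_⟩
      · rcases hroot with h | h
        · exact absurd h List.not_mem_nil
        · exact h
      · intro a ha p hp
        rcases hcl a ha with h | h
        · exact absurd h List.not_mem_nil
        · exact h p hp
    | cons c rest =>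
      exfalso
      simp only [List.length_cons] at hfuel
      omega
  | succ fuel ihf =>
    intro anc queue hN hsub hfuel hQ hA hcl hroot
    cases queue with
    | nil =>
      refine ⟨fun a ha => ha, hA, ?_, ?_⟩
      · rcases hroot with h | h
        · exact absurd h List.not_mem_nil
        · exact h
      · intro a ha p hp
        rcases hcl a ha with h | h
        · exact absurd h List.not_mem_nil
        · exact h p hp
    | cons c rest =>
      by_cases hc : PySem.Dict.contains (⟨g⟩ : PySem.Dict String (List String)) c = true
      · have hloop : pvBfsLoop g (fuel+1) anc (c :: rest) =
            pvBfsLoop g fuel ((pvPar g c).foldl pvBfsStep (anc, rest)).1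
              ((pvPar g c).foldl pvBfsStep (anc, rest)).2 := by
          simp only [pvBfsLoop]
          rw [if_pos hc]
          rfl
        rw [hloop]
        obtain ⟨c1, c2, c3, c4, c5, c6, c7, c8⟩ := pv_bfs_fold (pvPar g c) anc rest hN
        have hcR : c = root ∨ pvReach g root c := hQ c List.mem_cons_self
        have hpsR : ∀ p ∈ pvPar g c, pvReach g root p := by
          intro p hp
          rcases hcR with rfl | h
          · exact .base hp
          · exact .step h hp
        have hsub' : ∀ a ∈ ((pvPar g c).foldl pvBfsStep (anc, rest)).1, a ∈ pvP g := by
          intro a ha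
          rcases c3 a ha with h | h
          · exact hsub a h
          · exact pv_par_sub g c a h
        have hlenA : anc.length ≤ ((pvPar g c).foldl pvBfsStep (anc, rest)).1.length :=
          pv_len_le hN c1
        have hlenP : ((pvPar g c).foldl pvBfsStep (anc, rest)).1.length ≤ (pvP g).length :=
          pv_len_le c2 hsub'
        have hfuel' : ((pvPar g c).foldl pvBfsStep (anc, rest)).2.length +
            ((pvP g).length - ((pvPar g c).foldl pvBfsStep (anc, rest)).1.length) ≤ fuel := by
          simp only [List.length_cons] at hfuel
          omega
        have hQ' : ∀ x ∈ ((pvPar g c).foldl pvBfsStep (anc, rest)).2, x = root ∨ pvReach g root x := by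
          intro x hx
          rcases c7 x hx with h | h
          · exact hQ x (List.mem_cons_of_mem c h)
          · rcases c3 x h with h' | h'
            · exact Or.inr (hA x h')
            · exact Or.inr (hpsR x h')
        have hA' : ∀ a ∈ ((pvPar g c).foldl pvBfsStep (anc, rest)).1, pvReach g root a := by
          intro a ha
          rcases c3 a ha with h | h
          · exact hA a h
          · exact hpsR a h
        have hcl' : ∀ a ∈ ((pvPar g c).foldl pvBfsStep (anc, rest)).1,
            a ∈ ((pvPar g c).foldl pvBfsStep (anc, rest)).2 ∨
            ∀ p ∈ pvPar g a, p ∈ ((pvPar g c).foldl pvBfsStep (anc, rest)).1 := by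
          intro a ha
          rcases c5 a ha with h | h
          · rcases hcl a h with hq | hcl2
            · rcases List.mem_cons.1 hq with rfl | hq'
              · exact Or.inr c4
              · exact Or.inl (c6 _ hq')
            · exact Or.inr (fun p hp => c1 p (hcl2 p hp))
          · exact Or.inl h
        have hroot' : root ∈ ((pvPar g c).foldl pvBfsStep (anc, rest)).2 ∨
            ∀ p ∈ pvPar g root, p ∈ ((pvPar g c).foldl pvBfsStep (anc, rest)).1 := by
          rcases hroot with hq | hcl2
          · rcases List.mem_cons.1 hq with rfl | hq'
            · exact Or.inr c4
            · exact Or.inl (c6 _ hq')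
          · exact Or.inr (fun p hp => c1 p (hcl2 p hp))
        obtain ⟨d1, d2, d3, d4⟩ := ihf _ _ c2 hsub' hfuel' hQ' hA' hcl' hroot'
        exact ⟨fun a ha => d1 a (c1 a ha), d2, d3, d4⟩
      · have hpar : pvPar g c = [] :=
          pv_par_of_not_contains g c (Bool.eq_false_iff.mpr hc)
        have hloop : pvBfsLoop g (fuel+1) anc (c :: rest) = pvBfsLoop g fuel anc rest := by
          simp only [pvBfsLoop]
          rw [if_neg hc]
        rw [hloop]
        have hfuel' : rest.length + ((pvP g).length - anc.length) ≤ fuel := by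
          simp only [List.length_cons] at hfuel
          omega
        have hcl' : ∀ a ∈ anc, a ∈ rest ∨ ∀ p ∈ pvPar g a, p ∈ anc := by
          intro a ha
          rcases hcl a ha with hq | h
          · rcases List.mem_cons.1 hq with rfl | hq'
            · refine Or.inr ?_
              rw [hpar]
              intro p hp
              exact absurd hp List.not_mem_nil
            · exact Or.inl hq'
          · exact Or.inr h
        have hroot' : root ∈ rest ∨ ∀ p ∈ pvPar g root, p ∈ anc := by
          rcases hroot with hq | h
          · rcases List.mem_cons.1 hq with rfl | hq'
            · refine Or.inr ?_
              rw [hpar]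
              intro p hp
              exact absurd hp List.not_mem_nil
            · exact Or.inl hq'
          · exact Or.inr h
        exact ihf _ _ hN hsub hfuel' (fun x hx => hQ x (List.mem_cons_of_mem c hx)) hA hcl' hroot'

theorem pv_ancA_iff (g : List (String × List String)) (root : String) :
    ∀ x, x ∈ pvGetAncestors root g ↔ pvReach g root x := by
  have h := pv_bfs_main g root (pvFuel g) PySem.Set.empty [root]
    List.nodup_nil (by intro a ha; exact absurd ha List.not_mem_nil)
    (by simp only [pvFuel, pvP, PySem.Set.empty, List.length_cons, List.length_nil]; omega)
    (by intro x hx; exact Or.inl (List.mem_singleton.1 hx))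
    (by intro a ha; exact absurd ha List.not_mem_nil)
    (by intro a ha; exact absurd ha List.not_mem_nil)
    (Or.inl (List.mem_singleton.2 rfl))
  obtain ⟨_, d2, d3, d4⟩ := h
  intro x
  constructor
  · exact d2 x
  · exact pv_reach_mem g root _ d3 d4 x

-- B's recursive DFS computes exactly the set of ancestors
theorem pv_dfs_main (g : List (String × List String)) (root : String) :
    ∀ (fuel : Nat) (node : String) (anc : PySem.Set String),
    anc.Nodup → (∀ a ∈ anc, a ∈ pvP g) →
    (pvP g).length - anc.length < fuel →
    (node = root ∨ pvReach g root node) →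
    (∀ a ∈ anc, pvReach g root a) →
    (∀ a ∈ anc, a ∈ pvDfsVisit g fuel node anc) ∧
    (pvDfsVisit g fuel node anc).Nodup ∧
    (∀ a ∈ pvDfsVisit g fuel node anc, a ∈ pvP g) ∧
    (∀ a ∈ pvDfsVisit g fuel node anc, pvReach g root a) ∧
    (∀ p ∈ pvPar g node, p ∈ pvDfsVisit g fuel node anc) ∧
    (∀ a ∈ pvDfsVisit g fuel node anc, a ∉ anc → ∀ p ∈ pvPar g a, p ∈ pvDfsVisit g fuel node anc) := by
  intro fuel
  induction fuel with
  | zero =>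
    intro node anc hN hsub hfuel hnode hA
    exact absurd hfuel (by omega)
  | succ fuel ihf =>
    intro node anc hN hsub hfuel hnode hA
    have hpsR : ∀ p ∈ pvPar g node, pvReach g root p := by
      intro p hp
      rcases hnode with rfl | h
      · exact .base hp
      · exact .step h hp
    have key : ∀ (ps : List String), (∀ p ∈ ps, pvReach g root p) → (∀ p ∈ ps, p ∈ pvP g) →
        ∀ (s : PySem.Set String),
        (∀ a ∈ anc, a ∈ s) → s.Nodup → (∀ a ∈ s, a ∈ pvP g) → (∀ a ∈ s, pvReach g root a) →
        (∀ a ∈ s, a ∉ anc → ∀ p ∈ pvPar g a, p ∈ s) →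
        (∀ x ∈ s, x ∈ ps.foldl (fun s p => if PySem.Set.contains s p then s else pvDfsVisit g fuel p (PySem.Set.add s p)) s) ∧
        (ps.foldl (fun s p => if PySem.Set.contains s p then s else pvDfsVisit g fuel p (PySem.Set.add s p)) s).Nodup ∧
        (∀ a ∈ ps.foldl (fun s p => if PySem.Set.contains s p then s else pvDfsVisit g fuel p (PySem.Set.add s p)) s, a ∈ pvP g) ∧
        (∀ a ∈ ps.foldl (fun s p => if PySem.Set.contains s p then s else pvDfsVisit g fuel p (PySem.Set.add s p)) s, pvReach g root a) ∧
        (∀ p ∈ ps, p ∈ ps.foldl (fun s p => if PySem.Set.contains s p then s else pvDfsVisit g fuel p (PySem.Set.add s p)) s) ∧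
        (∀ a ∈ ps.foldl (fun s p => if PySem.Set.contains s p then s else pvDfsVisit g fuel p (PySem.Set.add s p)) s,
          a ∉ anc → ∀ p ∈ pvPar g a, p ∈ ps.foldl (fun s p => if PySem.Set.contains s p then s else pvDfsVisit g fuel p (PySem.Set.add s p)) s) := by
      intro ps
      induction ps with
      | nil =>
        intro _ _ s h1 h2 h3 h4 h5
        simp only [List.foldl_nil]
        exact ⟨fun x hx => hx, h2, h3, h4, fun p hp => absurd hp List.not_mem_nil, h5⟩
      | cons p ps ihp =>
        intro hR hP s h1 h2 h3 h4 h5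
        by_cases hcp : PySem.Set.contains s p = true
        · have hstep : (if PySem.Set.contains s p then s else pvDfsVisit g fuel p (PySem.Set.add s p)) = s := by
            rw [if_pos hcp]
          simp only [List.foldl_cons, hstep]
          obtain ⟨e1, e2, e3, e4, e5, e6⟩ :=
            ihp (fun x hx => hR x (List.mem_cons_of_mem p hx)) (fun x hx => hP x (List.mem_cons_of_mem p hx)) s h1 h2 h3 h4 h5
          refine ⟨e1, e2, e3, e4, ?_, e6⟩
          intro x hx
          rcases List.mem_cons.1 hx with rfl | hx
          · exact e1 _ ((PySem.Set.contains_iff s x).1 hcp)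
          · exact e5 _ hx
        · have hpmem : p ∉ s := fun hmem => hcp ((PySem.Set.contains_iff s p).2 hmem)
          have hadd : PySem.Set.add s p = s ++ [p] := by
            unfold PySem.Set.add; rw [if_neg hcp]
          have hmemadd : ∀ x, x ∈ PySem.Set.add s p ↔ x ∈ s ∨ x = p := fun x => PySem.Set.mem_add s p x
          have hN' : (PySem.Set.add s p).Nodup := PySem.Set.nodup_add s p h2
          have hsub' : ∀ a ∈ PySem.Set.add s p, a ∈ pvP g := by
            intro a ha
            rcases (hmemadd a).1 ha with h | rfl
            · exact h3 a h
            · exact hP a List.mem_cons_self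
          have hlen1 : anc.length ≤ s.length := pv_len_le hN h1
          have hlen2 : (PySem.Set.add s p).length = s.length + 1 := by rw [hadd]; simp
          have hlen3 : (PySem.Set.add s p).length ≤ (pvP g).length := pv_len_le hN' hsub'
          have hfuel' : (pvP g).length - (PySem.Set.add s p).length < fuel := by omega
          have hA' : ∀ a ∈ PySem.Set.add s p, pvReach g root a := by
            intro a ha
            rcases (hmemadd a).1 ha with h | rfl
            · exact h4 a h
            · exact hR a List.mem_cons_self
          obtain ⟨e1, e2, e3, e4, e5, e6⟩ :=
            ihf p (PySem.Set.add s p) hN' hsub' hfuel' (Or.inr (hR p List.mem_cons_self)) hA'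
          have hstep : (if PySem.Set.contains s p then s else pvDfsVisit g fuel p (PySem.Set.add s p)) =
              pvDfsVisit g fuel p (PySem.Set.add s p) := by
            rw [if_neg hcp]
          simp only [List.foldl_cons, hstep]
          have hmono : ∀ x ∈ s, x ∈ pvDfsVisit g fuel p (PySem.Set.add s p) := by
            intro x hx
            exact e1 _ ((hmemadd x).2 (Or.inl hx))
          obtain ⟨f1, f2, f3, f4, f5, f6⟩ :=
            ihp (fun x hx => hR x (List.mem_cons_of_mem p hx)) (fun x hx => hP x (List.mem_cons_of_mem p hx))
              (pvDfsVisit g fuel p (PySem.Set.add s p))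
              (fun a ha => hmono a (h1 a ha)) e2 e3 e4
              (by
                intro a ha hanc
                by_cases hin : a ∈ PySem.Set.add s p
                · rcases (hmemadd a).1 hin with h | rfl
                  · intro q hq
                    exact hmono _ (h5 a h hanc q hq)
                  · exact e5
                · exact e6 a ha hin)
          refine ⟨fun x hx => f1 _ (hmono x hx), f2, f3, f4, ?_, f6⟩
          intro x hx
          rcases List.mem_cons.1 hx with rfl | hx
          · exact f1 _ (e1 _ ((hmemadd x).2 (Or.inr rfl)))
          · exact f5 _ hx
    have hunf : pvDfsVisit g (fuel+1) node anc =
        (pvPar g node).foldl (fun s p => if PySem.Set.contains s p then s else pvDfsVisit g fuel p (PySem.Set.add s p)) anc := rfl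
    rw [hunf]
    obtain ⟨k1, k2, k3, k4, k5, k6⟩ :=
      key (pvPar g node) hpsR (fun p hp => pv_par_sub g node p hp) anc (fun a ha => ha) hN hsub hA
        (fun a _ hanc _ _ => absurd (by assumption) (by simp_all))
    exact ⟨k1, k2, k3, k4, k5, k6⟩

theorem pv_ancB_iff (g : List (String × List String)) (root : String) :
    ∀ x, x ∈ pvDfsVisit g (pvFuelB g) root PySem.Set.empty ↔ pvReach g root x := by
  have h := pv_dfs_main g root (pvFuelB g) root PySem.Set.empty
    List.nodup_nil (by intro a ha; exact absurd ha List.not_mem_nil)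
    (by simp only [pvFuelB, pvP, PySem.Set.empty, List.length_nil]; omega)
    (Or.inl rfl)
    (by intro a ha; exact absurd ha List.not_mem_nil)
  obtain ⟨_, _, _, d4, d5, d6⟩ := h
  intro x
  constructor
  · exact d4 x
  · exact pv_reach_mem g root _ d5 (fun a ha => d6 a ha (fun h => absurd h List.not_mem_nil)) x

-- ===== VERDICT (by name: the statement is the Claim_ definition above) =====
theorem map_to_high_level_spec : Claim_equal_map_to_high_level := by
  intro cid g nm _hdom
  unfold Spec_map_to_high_level map_to_high_level map_to_high_level_alt
  have hiff : ∀ x, x ∈ PySem.Set.union (pvGetAncestors cid g) [cid] ↔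
      x ∈ PySem.Set.union (pvDfsVisit g (pvFuelB g) cid PySem.Set.empty) [cid] := by
    intro x
    rw [PySem.Set.mem_union, PySem.Set.mem_union]
    rw [pv_ancA_iff g cid x, pv_ancB_iff g cid x]
  have hgen : ∀ (t : String),
      PySem.Set.contains (PySem.Set.ofList ((PySem.Set.union (pvGetAncestors cid g) [cid]).map
        (fun aid => PySem.Dict.getD ⟨nm⟩ aid ""))) t
      = (PySem.Set.union (pvDfsVisit g (pvFuelB g) cid PySem.Set.empty) [cid]).any
        (fun i => PySem.Dict.getD ⟨nm⟩ i "" == t) := by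
    intro t
    rw [Bool.eq_iff_iff]
    rw [PySem.Set.contains_iff, PySem.Set.mem_ofList]
    simp only [List.mem_map, List.any_eq_true, beq_iff_eq]
    constructor
    · rintro ⟨aid, hmem, h⟩
      exact ⟨aid, (hiff aid).1 hmem, h⟩
    · rintro ⟨i, hmem, h⟩
      exact ⟨i, (hiff i).2 hmem, h⟩
  have hsp :
      (PySem.Set.contains (PySem.Set.ofList ((PySem.Set.union (pvGetAncestors cid g) [cid]).map
        (fun aid => PySem.Dict.getD ⟨nm⟩ aid ""))) "Speech" ||
       PySem.Set.contains (PySem.Set.ofList ((PySem.Set.union (pvGetAncestors cid g) [cid]).map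
        (fun aid => PySem.Dict.getD ⟨nm⟩ aid ""))) "Human voice")
      = (PySem.Set.union (pvDfsVisit g (pvFuelB g) cid PySem.Set.empty) [cid]).any
        (fun i => PySem.Dict.getD ⟨nm⟩ i "" == "Speech" || PySem.Dict.getD ⟨nm⟩ i "" == "Human voice") := by
    rw [Bool.eq_iff_iff]
    simp only [Bool.or_eq_true, PySem.Set.contains_iff, PySem.Set.mem_ofList, List.mem_map,
      List.any_eq_true, beq_iff_eq]
    constructor
    · rintro (⟨aid, hmem, h⟩ | ⟨aid, hmem, h⟩)
      · exact ⟨aid, (hiff aid).1 hmem, Or.inl h⟩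
      · exact ⟨aid, (hiff aid).1 hmem, Or.inr h⟩
    · rintro ⟨i, hmem, h | h⟩
      · exact Or.inl ⟨i, (hiff i).2 hmem, h⟩
      · exact Or.inr ⟨i, (hiff i).2 hmem, h⟩
  simp only []
  rw [hgen "Music", hsp]
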